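-- pv_equiv track=rewrite | github.com/dtpaltz/Python-Practice | Interview-Questions/HouseStates.py | future_competing_houses
-- ===== SOURCE A (Python) =====
-- def future_competing_houses(states, days):
--     n = len(states)
--     states.insert(0, 0)
--     states.append(0)
--     next_state = [0] * len(states)
--     for d in range(days):
--         for i in range(1, n + 1):
--             next_state[i] = int(states[i - 1] != states[i + 1])
--         states = next_state[:]
--     return states[1:n + 1]
-- ===== SOURCE B (Python) =====
-- def _step(s):
--     n = len(s)
--     return [int((s[i - 1] if i > 0 else 0) != (s[i + 1] if i + 1 < n else 0))
--             for i in range(n)]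
--
--
-- def future_competing_houses(states, days):
--     cur = list(states)
--     history = []
--     seen = {}
--     d = 0
--     while d < days:
--         key = tuple(cur)
--         if key in seen:
--             start = seen[key]
--             period = d - start
--             idx = start + (days - start) % period
--             return list(history[idx])
--         seen[key] = d
--         history.append(cur)
--         cur = _step(cur)
--         d += 1
--     return cur
-- ===== Notes on version B (the rewrite author's own statement) =====
-- stated objective: alternative
-- what changed: B replaces A's fixed day-by-day padded-array simulation with cycle detection: it records each state's first day in a dict and a history list, and on the first repeat reduces the remaining days modulo the period and returns the stored state (B also does not mutate the input list, while A inserts/appends to it).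
import Mathlib
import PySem

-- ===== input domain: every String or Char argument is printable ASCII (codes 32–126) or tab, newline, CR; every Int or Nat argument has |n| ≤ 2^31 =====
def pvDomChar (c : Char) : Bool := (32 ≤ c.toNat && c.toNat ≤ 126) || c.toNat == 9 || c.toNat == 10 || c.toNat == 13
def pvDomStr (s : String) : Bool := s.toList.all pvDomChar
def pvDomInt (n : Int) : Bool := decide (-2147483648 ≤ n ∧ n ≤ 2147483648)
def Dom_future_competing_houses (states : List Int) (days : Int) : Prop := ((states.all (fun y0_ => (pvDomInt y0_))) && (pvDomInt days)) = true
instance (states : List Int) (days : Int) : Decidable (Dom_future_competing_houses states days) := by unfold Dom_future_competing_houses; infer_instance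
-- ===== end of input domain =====

-- B replaces the day-by-day simulation with cycle detection (states seen before reduce the
-- remaining days modulo the period); equivalence is about the RETURN value only — Python A
-- mutates its `states` argument (insert/append), B does not.

-- ===== PORT A =====
-- All indices used below (i-1, i, i+1 for 1 ≤ i ≤ n on a list of length n+2) are always in
-- range, so pyGetD/pySetD are exact here (no IndexError is reachable).
def future_competing_houses (states : List Int) (days : Int) : List Int :=
  let n : Int := states.length
  let states := PySem.List.insert states 0 (0 : Int)
  let states := states ++ [(0 : Int)]
  let next_state : List Int := List.replicate states.length 0
  let res := (PySem.List.pyRange 0 days 1).foldl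
    (fun (st : List Int × List Int) _ =>
      let ns := (PySem.List.pyRange 1 (n + 1) 1).foldl
        (fun a i =>
          PySem.List.pySetD a i
            (if PySem.List.pyGetD st.1 (i - 1) 0 ≠ PySem.List.pyGetD st.1 (i + 1) 0 then 1 else 0))
        st.2
      (ns, ns))
    (states, next_state)
  PySem.List.slice res.1 (some 1) (some (n + 1))

-- ===== PORT B =====
-- Source B's _step: one comprehension over range(n) with boundary conditionals.
def fchStep (s : List Int) : List Int :=
  let n : Int := s.length
  (PySem.List.pyRange 0 n 1).map (fun i =>
    if (if i > 0 then PySem.List.pyGetD s (i - 1) 0 else 0)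
       ≠ (if i + 1 < n then PySem.List.pyGetD s (i + 1) 0 else 0)
    then (1 : Int) else 0)

-- Source B's while-loop with the seen/history cycle detection; history[idx] is always in range.
def fchLoop (days : Int) (cur : List Int) (history : List (List Int))
    (seen : PySem.Dict (List Int) Int) (d : Int) : List Int :=
  if _h : d < days then
    match seen.get? cur with
    | some start =>
        let period := d - start
        let idx := start + PySem.Int.mod (days - start) period
        PySem.List.pyGetD history idx []
    | none => fchLoop days (fchStep cur) (history ++ [cur]) (seen.insert cur d) (d + 1)
  else cur
termination_by (days - d).toNat
decreasing_by omega

def future_competing_houses_alt (states : List Int) (days : Int) : List Int :=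
  fchLoop days states [] PySem.Dict.empty 0

-- ===== PRECONDITION & SPEC =====
def Spec_future_competing_houses (states : List Int) (days : Int) (out : List Int) : Prop := out = future_competing_houses_alt states days
instance (states : List Int) (days : Int) (out : List Int) : Decidable (Spec_future_competing_houses states days out) := by unfold Spec_future_competing_houses; infer_instance

-- ===== CLAIM (what is proved, stated in full; the proofs are below) =====
def Claim_equal_future_competing_houses : Prop := ∀ (states : List Int) (days : Int), Dom_future_competing_houses states days → Spec_future_competing_houses states days (future_competing_houses states days)

-- ===== LEMMAS AND PROOFS =====

theorem length_fchStep (s : List Int) : (fchStep s).length = s.length := by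
  simp [fchStep, PySem.List.length_pyRange_one]

theorem length_iterate (s : List Int) (k : ℕ) : (fchStep^[k] s).length = s.length := by
  induction k with
  | zero => rfl
  | succ k ih => rw [Function.iterate_succ_apply', length_fchStep, ih]

theorem fchStep_get (s : List Int) (i : ℕ) (hi : i < s.length) :
    PySem.List.pyGetD (fchStep s) (i : Int) 0 =
      if (if (i : Int) > 0 then PySem.List.pyGetD s ((i : Int) - 1) 0 else 0)
         ≠ (if (i : Int) + 1 < (s.length : Int) then PySem.List.pyGetD s ((i : Int) + 1) 0 else 0)
      then (1 : Int) else 0 := by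
  unfold fchStep
  rw [PySem.List.pyGetD_map_pyRange _ s.length i 0 hi]

-- value of padded list 0 :: s ++ [0] at index k
theorem pad_get (s : List Int) (k : Int) (h0 : 0 ≤ k) (h1 : k ≤ (s.length : Int) + 1) :
    PySem.List.pyGetD (0 :: s ++ [0]) k 0 =
      if k = 0 ∨ k = (s.length : Int) + 1 then 0 else PySem.List.pyGetD s (k - 1) 0 := by
  rcases eq_or_lt_of_le h0 with h | hpos
  · simp [← h, PySem.List.pyGetD_zero_cons]
  · have hlen : (0 :: s ++ [0]).length = s.length + 2 := by simp
    rw [PySem.List.pyGetD_eq_getElem _ _ h0 (by rw [hlen]; omega)]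
    by_cases hend : k = (s.length : Int) + 1
    · rw [if_pos (Or.inr hend)]
      have hidx : k.toNat = s.length + 1 := by omega
      simp only [hidx]
      simp
    · rw [if_neg (by omega)]
      rw [PySem.List.pyGetD_eq_getElem _ _ (by omega) (by omega)]
      have hidx : k.toNat = (k - 1).toNat + 1 := by omega
      rw [List.getElem_append_left (by simp only [List.length_cons]; omega)]
      simp only [hidx]
      simp

-- a fold writing g i at positions 1..m, described pointwise
theorem fold_write (g : Int → Int) (m : ℕ) : ∀ (arr : List Int), (m : Int) < arr.length →
    (((PySem.List.pyRange 1 ((m : Int) + 1) 1).foldl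
        (fun a i => PySem.List.pySetD a i (g i)) arr).length = arr.length ∧
     ∀ j : Int, 0 ≤ j → j < (arr.length : Int) →
       PySem.List.pyGetD ((PySem.List.pyRange 1 ((m : Int) + 1) 1).foldl
           (fun a i => PySem.List.pySetD a i (g i)) arr) j 0
         = if 1 ≤ j ∧ j ≤ (m : Int) then g j else PySem.List.pyGetD arr j 0) := by
  induction m with
  | zero =>
      intro arr _
      rw [show ((0 : ℕ) : Int) + 1 = 1 by norm_num, PySem.List.pyRange_one_eq_nil le_rfl]
      simp only [List.foldl_nil]
      refine ⟨by trivial, ?_⟩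
      intro j h0 h1
      rw [if_neg (by omega)]
  | succ m ih =>
      intro arr hlen
      have hsplit : PySem.List.pyRange 1 (((m + 1 : ℕ) : Int) + 1) 1
          = PySem.List.pyRange 1 ((m : Int) + 1) 1 ++ [(m : Int) + 1] := by
        rw [show (((m + 1 : ℕ) : Int) + 1) = ((m : Int) + 1) + 1 by push_cast; ring]
        exact PySem.List.pyRange_one_succ_right (by omega)
      obtain ⟨ihlen, ihget⟩ := ih arr (by omega)
      rw [hsplit, List.foldl_append]
      set r := (PySem.List.pyRange 1 ((m : Int) + 1) 1).foldl
        (fun a i => PySem.List.pySetD a i (g i)) arr with hr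
      simp only [List.foldl_cons, List.foldl_nil]
      constructor
      · rw [PySem.List.length_pySetD, ihlen]
      · intro j h0 h1
        obtain ⟨jn, rfl⟩ : ∃ jn : ℕ, j = (jn : Int) := ⟨j.toNat, by omega⟩
        have hcast : ((m : Int) + 1) = (((m + 1 : ℕ)) : Int) := by push_cast; ring
        rw [hcast, PySem.List.pyGetD_pySetD_natCast r (m + 1) jn _ 0 (by omega)]
        by_cases hj : jn = m + 1
        · rw [if_pos hj, if_pos (by omega)]
          rw [hj]
        · rw [if_neg hj, ihget (jn : Int) h0 (by omega)]
          by_cases hj2 : 1 ≤ (jn : Int) ∧ (jn : Int) ≤ (m : Int)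
          · rw [if_pos hj2, if_pos (by omega)]
          · rw [if_neg hj2, if_neg (by omega)]

-- one inner day-loop on padded lists computes fchStep of the middle
theorem inner_step (s t : List Int) (ht : t.length = s.length) :
    (PySem.List.pyRange 1 ((s.length : Int) + 1) 1).foldl
      (fun a i => PySem.List.pySetD a i
        (if PySem.List.pyGetD (0 :: s ++ [0]) (i - 1) 0
            ≠ PySem.List.pyGetD (0 :: s ++ [0]) (i + 1) 0 then 1 else 0))
      (0 :: t ++ [0])
    = 0 :: fchStep s ++ [0] := by
  set g : Int → Int := fun i =>
    if PySem.List.pyGetD (0 :: s ++ [0]) (i - 1) 0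
        ≠ PySem.List.pyGetD (0 :: s ++ [0]) (i + 1) 0 then 1 else 0 with hg
  have harrlen : (0 :: t ++ [0]).length = s.length + 2 := by simp [ht]
  obtain ⟨hlen, hget⟩ := fold_write g s.length (0 :: t ++ [0]) (by rw [harrlen]; omega)
  set r := (PySem.List.pyRange 1 ((s.length : Int) + 1) 1).foldl
    (fun a i => PySem.List.pySetD a i (g i)) (0 :: t ++ [0]) with hrdef
  have hrlen : r.length = s.length + 2 := by rw [hlen, harrlen]
  have hrhslen : (0 :: fchStep s ++ [0]).length = s.length + 2 := by simp [length_fchStep]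
  apply List.ext_getElem (by omega)
  intro j hj1 hj2
  have hjs : j < s.length + 2 := by omega
  have e1 : r[j] = PySem.List.pyGetD r (j : Int) 0 := by
    rw [PySem.List.pyGetD_eq_getElem _ _ (by omega) (by rw [hrlen]; push_cast; omega)]
    simp
  have e2 : (0 :: fchStep s ++ [0])[j] = PySem.List.pyGetD (0 :: fchStep s ++ [0]) (j : Int) 0 := by
    rw [PySem.List.pyGetD_eq_getElem _ _ (by omega) (by rw [hrhslen]; push_cast; omega)]
    simp
  rw [e1, e2]
  rw [hget (j : Int) (by omega) (by omega)]
  have hpadR : PySem.List.pyGetD (0 :: fchStep s ++ [0]) (j : Int) 0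
      = if (j : Int) = 0 ∨ (j : Int) = (s.length : Int) + 1 then 0
        else PySem.List.pyGetD (fchStep s) ((j : Int) - 1) 0 := by
    have := pad_get (fchStep s) (j : Int) (by omega) (by rw [length_fchStep]; omega)
    rw [this, length_fchStep]
  rw [hpadR]
  by_cases hmid : 1 ≤ (j : Int) ∧ (j : Int) ≤ (s.length : Int)
  · rw [if_pos hmid, if_neg (by omega)]
    -- middle position: compare g j with fchStep value at j-1
    have hj1' : (j : Int) - 1 = ((j - 1 : ℕ) : Int) := by omega
    have hjlt : j - 1 < s.length := by omega
    rw [hj1', fchStep_get s (j - 1) hjlt]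
    rw [hg]
    simp only
    congr 1
    -- equality of the two ≠-conditions
    have hL : PySem.List.pyGetD (0 :: s ++ [0]) ((j : Int) - 1) 0
        = if ((j - 1 : ℕ) : Int) > 0 then PySem.List.pyGetD s (((j - 1 : ℕ) : Int) - 1) 0 else 0 := by
      rw [pad_get s ((j : Int) - 1) (by omega) (by omega)]
      by_cases h1 : (j : Int) - 1 = 0
      · rw [if_pos (by omega), if_neg (by omega)]
      · rw [if_neg (by omega), if_pos (by omega)]
        congr 1
        omega
    have hR : PySem.List.pyGetD (0 :: s ++ [0]) ((j : Int) + 1) 0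
        = if ((j - 1 : ℕ) : Int) + 1 < (s.length : Int) then PySem.List.pyGetD s (((j - 1 : ℕ) : Int) + 1) 0 else 0 := by
      rw [pad_get s ((j : Int) + 1) (by omega) (by omega)]
      by_cases h1 : (j : Int) + 1 = (s.length : Int) + 1
      · rw [if_pos (by omega), if_neg (by omega)]
      · rw [if_neg (by omega), if_pos (by omega)]
        congr 1
        omega
    rw [hL, hR]
  · -- boundary positions 0 and n+1: both sides are 0
    rw [if_neg hmid, if_pos (by omega)]
    have : (j : Int) = 0 ∨ (j : Int) = (s.length : Int) + 1 := by omega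
    rcases this with h | h
    · rw [show j = 0 by omega]
      simp [PySem.List.pyGetD_zero_cons]
    · rw [pad_get t (j : Int) (by omega) (by omega), if_pos (by omega)]

-- the outer day loop of A iterates fchStep on the middle of the padded pair
theorem outer_fold (s : List Int) (D : ℕ) : ∀ (t : List Int), t.length = s.length →
    ∃ t' : List Int, t'.length = s.length ∧
      (PySem.List.pyRange 0 (D : Int) 1).foldl
        (fun (st : List Int × List Int) _ =>
          let ns := (PySem.List.pyRange 1 ((s.length : Int) + 1) 1).foldl
            (fun a i => PySem.List.pySetD a i
              (if PySem.List.pyGetD st.1 (i - 1) 0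
                  ≠ PySem.List.pyGetD st.1 (i + 1) 0 then 1 else 0)) st.2
          (ns, ns))
        (0 :: s ++ [0], 0 :: t ++ [0])
      = (0 :: fchStep^[D] s ++ [0], 0 :: t' ++ [0]) := by
  induction D with
  | zero =>
      intro t ht
      refine ⟨t, ht, ?_⟩
      rw [show ((0 : ℕ) : Int) = 0 by norm_num, PySem.List.pyRange_one_eq_nil le_rfl]
      simp only [List.foldl_nil, Function.iterate_zero_apply]
  | succ D ih =>
      intro t ht
      obtain ⟨t', ht', hfold⟩ := ih t ht
      have hsplit : PySem.List.pyRange 0 (((D + 1 : ℕ)) : Int) 1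
          = PySem.List.pyRange 0 (D : Int) 1 ++ [(D : Int)] := by
        rw [show (((D + 1 : ℕ)) : Int) = (D : Int) + 1 by push_cast; ring]
        exact PySem.List.pyRange_one_succ_right (by omega)
      rw [hsplit, List.foldl_append, hfold]
      simp only [List.foldl_cons, List.foldl_nil]
      have hlenD : (fchStep^[D] s).length = s.length := length_iterate s D
      have hstep := inner_step (fchStep^[D] s) t' (by omega)
      rw [hlenD] at hstep
      refine ⟨fchStep (fchStep^[D] s), by rw [length_fchStep, hlenD], ?_⟩
      rw [hstep, Function.iterate_succ_apply']

-- A computes the D-fold iteration, D = days.toNat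
theorem A_eq_iterate (s : List Int) (days : Int) :
    future_competing_houses s days = fchStep^[days.toNat] s := by
  unfold future_competing_houses
  simp only [PySem.List.insert_zero]
  have hpadded : ((0 : Int) :: s) ++ [(0 : Int)] = 0 :: s ++ [0] := by simp
  have hrepl : List.replicate (((0 : Int) :: s) ++ [(0 : Int)]).length (0 : Int)
      = 0 :: List.replicate s.length 0 ++ [0] := by
    have hl : (((0 : Int) :: s) ++ [(0 : Int)]).length = s.length + 2 := by simp
    rw [hl, List.replicate_succ, List.replicate_succ']
    simp
  by_cases hneg : days ≤ 0
  · rw [PySem.List.pyRange_one_eq_nil hneg]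
    simp only [List.foldl_nil]
    rw [show days.toNat = 0 by omega, Function.iterate_zero_apply]
    rw [hpadded]
    rw [PySem.List.slice_toNat _ (by omega) (by omega)]
    have h1 : ((1 : Int)).toNat = 1 := rfl
    have h2 : (((s.length : Int)) + 1).toNat = s.length + 1 := by omega
    rw [h1, h2]
    simp [List.take_left']
  · have hd : days = ((days.toNat : ℕ) : Int) := by omega
    rw [hpadded, hrepl]
    rw [hd]
    obtain ⟨t', ht', hfold⟩ := outer_fold s days.toNat (List.replicate s.length 0) (by simp)
    rw [hfold]
    simp only
    rw [PySem.List.slice_toNat _ (by omega) (by omega)]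
    have h2 : (((s.length : Int)) + 1).toNat = s.length + 1 := by omega
    rw [show ((1 : Int)).toNat = 1 from rfl, h2]
    have hlen : (fchStep^[days.toNat] s).length = s.length := length_iterate s days.toNat
    simp only [List.cons_append, List.drop_succ_cons, List.drop_zero, Nat.add_sub_cancel]
    rw [List.take_left' hlen]
    congr 1

-- periodicity: a cycle of length p starting at a reduces iterates mod p
theorem iterate_mod (f : List Int → List Int) (x : List Int) (a p : ℕ) (hp : 0 < p)
    (hcyc : f^[a + p] x = f^[a] x) : ∀ m : ℕ, f^[a + m] x = f^[a + m % p] x := by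
  intro m
  induction m using Nat.strong_induction_on with
  | _ m ih =>
      by_cases hm : m < p
      · rw [Nat.mod_eq_of_lt hm]
      · have hple : p ≤ m := by omega
        have h1 : f^[a + m] x = f^[a + (m - p)] x := by
          have : a + m = (m - p) + (a + p) := by omega
          rw [this, Function.iterate_add_apply, hcyc, ← Function.iterate_add_apply]
          congr 1
          omega
        rw [h1, ih (m - p) (by omega)]
        congr 2
        rw [Nat.mod_eq_sub_mod hple]

-- the B loop invariant: with a faithful history/seen, fchLoop lands on the iterate
theorem loop_inv (s : List Int) (days : Int) : ∀ (fuel d : ℕ) (history : List (List Int))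
    (seen : PySem.Dict (List Int) Int),
    (days - (d : Int)).toNat ≤ fuel →
    (d : Int) ≤ days →
    history.length = d →
    (∀ j : ℕ, j < d → history.getD j [] = fchStep^[j] s) →
    (∀ x j, seen.get? x = some j → ∃ k : ℕ, k < d ∧ j = (k : Int) ∧ fchStep^[k] s = x) →
    (∀ k : ℕ, k < d → seen.get? (fchStep^[k] s) ≠ none) →
    fchLoop days (fchStep^[d] s) history seen (d : Int) = fchStep^[days.toNat] s := by
  intro fuel
  induction fuel with
  | zero =>
      intro d history seen hfuel hdle _ _ _ _
      rw [fchLoop]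
      rw [dif_neg (by omega)]
      congr 1
      omega
  | succ fuel ih =>
      intro d history seen hfuel hdle hhlen hhist hseen1 hseen2
      rw [fchLoop]
      by_cases hlt : (d : Int) < days
      · rw [dif_pos hlt]
        cases hget : seen.get? (fchStep^[d] s) with
        | some start =>
            simp only
            obtain ⟨k, hk, hkstart, hkval⟩ := hseen1 _ _ hget
            set p : ℕ := d - k with hpdef
            have hp : 0 < p := by omega
            have hcyc : fchStep^[k + p] s = fchStep^[k] s := by
              rw [show k + p = d by omega, hkval]
            have hmodpos : 0 < (d : Int) - start := by omega
            have hmod := PySem.Int.mod_eq_emod_of_pos (a := days - start) hmodpos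
            set idx : Int := start + PySem.Int.mod (days - start) ((d : Int) - start) with hidx
            have hidxval : idx = start + (days - start) % ((d : Int) - start) := by
              rw [hidx, hmod]
            have hbound1 : 0 ≤ (days - start) % ((d : Int) - start) :=
              Int.emod_nonneg _ (by omega)
            have hbound2 : (days - start) % ((d : Int) - start) < (d : Int) - start :=
              Int.emod_lt_of_pos _ hmodpos
            have hidxlo : (k : Int) ≤ idx := by omega
            have hidxhi : idx < (d : Int) := by omega
            have hidxnat : idx = ((idx.toNat : ℕ) : Int) := by omega
            rw [hidxnat, PySem.List.pyGetD_natCast]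
            rw [hhist idx.toNat (by omega)]
            -- idx.toNat = k + (days.toNat - k) % p
            set m : ℕ := days.toNat - k with hmdef
            have hidxeq : idx.toNat = k + m % p := by
              have : ((m % p : ℕ) : Int) = (days - start) % ((d : Int) - start) := by
                have hm : ((m : ℕ) : Int) = days - start := by omega
                have hpint : ((p : ℕ) : Int) = (d : Int) - start := by omega
                rw [← hm, ← hpint]
                exact Int.natCast_mod m p
              omega
            have := iterate_mod fchStep s k p hp hcyc m
            rw [show days.toNat = k + m by omega, this, hidxeq]
        | none =>
            simp only
            have hnext := ih (d + 1) (history ++ [fchStep^[d] s]) (seen.insert (fchStep^[d] s) (d : Int))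
            rw [show ((d : ℕ) : Int) + 1 = (((d + 1 : ℕ)) : Int) by push_cast; ring]
            rw [← Function.iterate_succ_apply' fchStep d s]
            apply hnext
            · omega
            · omega
            · simp [hhlen]
            · intro j hj
              by_cases hjd : j < d
              · rw [List.getD_append _ _ _ _ (by omega), hhist j hjd]
              · have hjd' : j = d := by omega
                subst hjd'
                rw [List.getD_append_right history [fchStep^[j] s] [] j (by omega)]
                simp [hhlen]
            · intro x j hx
              rw [PySem.Dict.get?_insert] at hx
              by_cases hxc : x = fchStep^[d] s
              · rw [if_pos hxc] at hx
                injection hx with hdj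
                exact ⟨d, by omega, hdj.symm, hxc.symm⟩
              · rw [if_neg hxc] at hx
                obtain ⟨k, hk, h1, h2⟩ := hseen1 x j hx
                exact ⟨k, by omega, h1, h2⟩
            · intro k hk
              by_cases hxc : fchStep^[k] s = fchStep^[d] s
              · rw [hxc, PySem.Dict.get?_insert, if_pos rfl]
                simp
              · rw [PySem.Dict.get?_insert, if_neg hxc]
                by_cases hkd : k = d
                · exact absurd (by rw [hkd]) hxc
                · exact hseen2 k (by omega)
      · rw [dif_neg hlt]
        congr 1
        omega

theorem B_eq_iterate (s : List Int) (days : Int) :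
    future_competing_houses_alt s days = fchStep^[days.toNat] s := by
  unfold future_competing_houses_alt
  by_cases hneg : days ≤ 0
  · rw [fchLoop, dif_neg (by omega)]
    rw [show days.toNat = 0 by omega, Function.iterate_zero_apply]
  have := loop_inv s days days.toNat 0 [] PySem.Dict.empty (by omega)
  simp only [Nat.cast_zero, Function.iterate_zero_apply] at this
  apply this
  · omega
  · rfl
  · intro j hj; omega
  · intro x j hx
    rw [PySem.Dict.get?_empty] at hx
    exact absurd hx (by simp)
  · intro k hk; omega

-- ===== VERDICT (by name: the statement is the Claim_ definition above) =====
theorem future_competing_houses_spec : Claim_equal_future_competing_houses := by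
  intro states days _
  unfold Spec_future_competing_houses
  rw [A_eq_iterate, B_eq_iterate]
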